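-- pv_equiv track=rewrite | github.com/Happy-ryan/PS | 백준/Bronze/25494. 단순한 문제 （Small）/단순한 문제 （Small）.py | f
-- ===== SOURCE A (Python) =====
-- def f(a,b,c):
--     s = 0
--     for x in range(1,a+1):
--         for y in range(1,b+1):
--             for z in range(1,c+1):
--                 if (x%y == y%z) and (x%y == z%x) and (y%z == z%x):
--                     s += 1
--     return s
-- ===== SOURCE B (Python) =====
-- def f(a, b, c):
--     # x % y == y % z == z % x forces x == y == z (the common remainder is
--     # smaller than each of x, y, z, so no strict inequality can hold in the
--     # cycle), hence the count is just the number of x with 1 <= x <= min(a,b,c).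
--     m = min(a, b, c)
--     return m if m > 0 else 0
-- ===== Notes on version B (the rewrite author's own statement) =====
-- stated objective: faster
-- what changed: Replaced A's O(a*b*c) triple loop counting triples with x%y==y%z==z%x by the closed form max(0, min(a,b,c)), since the chained-remainder condition forces x==y==z.
import Mathlib
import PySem

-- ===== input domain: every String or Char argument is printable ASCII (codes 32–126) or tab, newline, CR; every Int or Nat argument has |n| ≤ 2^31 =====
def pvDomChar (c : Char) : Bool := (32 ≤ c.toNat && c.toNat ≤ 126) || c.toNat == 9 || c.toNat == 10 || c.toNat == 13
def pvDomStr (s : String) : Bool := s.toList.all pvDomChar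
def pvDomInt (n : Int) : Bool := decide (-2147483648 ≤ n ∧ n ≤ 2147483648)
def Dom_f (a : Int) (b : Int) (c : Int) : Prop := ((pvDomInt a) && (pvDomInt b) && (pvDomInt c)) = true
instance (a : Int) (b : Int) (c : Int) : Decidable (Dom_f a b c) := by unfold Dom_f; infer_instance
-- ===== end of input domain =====

-- B replaces A's O(a·b·c) triple loop by the closed form max 0 (min a b c):
-- the condition x%y == y%z == z%x forces x = y = z (objective: faster, asymptotic).

-- ===== PORT A =====
def f (a : Int) (b : Int) (c : Int) : Int :=
  (PySem.List.pyRange 1 (a + 1) 1).foldl (fun s x =>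
    (PySem.List.pyRange 1 (b + 1) 1).foldl (fun s y =>
      (PySem.List.pyRange 1 (c + 1) 1).foldl (fun s z =>
        if (PySem.Int.mod x y == PySem.Int.mod y z) &&
           (PySem.Int.mod x y == PySem.Int.mod z x) &&
           (PySem.Int.mod y z == PySem.Int.mod z x)
        then s + 1 else s) s) s) 0

-- ===== PORT B =====
def f_alt (a : Int) (b : Int) (c : Int) : Int :=
  let m := min (min a b) c
  if m > 0 then m else 0

-- ===== PRECONDITION & SPEC =====
def Spec_f (a : Int) (b : Int) (c : Int) (out : Int) : Prop := out = f_alt a b c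
instance (a : Int) (b : Int) (c : Int) (out : Int) : Decidable (Spec_f a b c out) := by unfold Spec_f; infer_instance

-- ===== CLAIM (what is proved, stated in full; the proofs are below) =====
def Claim_equal_f : Prop := ∀ (a : Int) (b : Int) (c : Int), Dom_f a b c → Spec_f a b c (f a b c)

-- ===== LEMMAS AND PROOFS =====

-- the 0/1 contribution of one (x,y,z) triple in A's loop
def pvInd (x y z : Int) : Int :=
  if (PySem.Int.mod x y == PySem.Int.mod y z) &&
     (PySem.Int.mod x y == PySem.Int.mod z x) &&
     (PySem.Int.mod y z == PySem.Int.mod z x)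
  then 1 else 0

-- indicator sums over a nodup list
theorem pv_sum_ind_list (t : Int) (l : List Int) (hnd : l.Nodup) :
    (l.map (fun z => if z = t then (1 : Int) else 0)).sum = if t ∈ l then 1 else 0 := by
  induction l with
  | nil => simp
  | cons a l ih =>
    rcases List.nodup_cons.mp hnd with ⟨ha, hl⟩
    by_cases h : a = t
    · subst h
      simp [ih hl, ha]
    · simp only [List.map_cons, List.sum_cons, if_neg h, List.mem_cons, zero_add, ih hl]
      have : (t = a) ↔ False := by constructor <;> intro hh <;> simp_all
      simp [this]

theorem pv_sum_ind (lo hi t : Int) :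
    ((PySem.List.pyRange lo hi 1).map (fun z => if z = t then (1 : Int) else 0)).sum
      = if lo ≤ t ∧ t < hi then 1 else 0 := by
  rw [pv_sum_ind_list t _ (PySem.List.nodup_pyRange_one lo hi)]
  simp [PySem.List.mem_pyRange_one]

-- the key arithmetic fact: for positive x, y, z the chained condition forces x = y = z
theorem pv_cond_iff (x y z : Int) (hx : 1 ≤ x) (hy : 1 ≤ y) (hz : 1 ≤ z) :
    (((PySem.Int.mod x y == PySem.Int.mod y z) &&
      (PySem.Int.mod x y == PySem.Int.mod z x) &&
      (PySem.Int.mod y z == PySem.Int.mod z x)) = true) ↔ (x = y ∧ y = z) := by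
  rw [PySem.Int.mod_eq_emod_of_pos (a := x) (b := y) (by omega),
      PySem.Int.mod_eq_emod_of_pos (a := y) (b := z) (by omega),
      PySem.Int.mod_eq_emod_of_pos (a := z) (b := x) (by omega)]
  simp only [Bool.and_eq_true, beq_iff_eq]
  constructor
  · rintro ⟨⟨h1, h2⟩, h3⟩
    have hxy : x % y < y := Int.emod_lt_of_pos x (by omega)
    have hyz : y % z < z := Int.emod_lt_of_pos y (by omega)
    have hzx : z % x < x := Int.emod_lt_of_pos z (by omega)
    have hle1 : y ≤ x := by
      by_contra h; push Not at h
      have : x % y = x := Int.emod_eq_of_lt (by omega) h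
      omega
    have hle2 : z ≤ y := by
      by_contra h; push Not at h
      have : y % z = y := Int.emod_eq_of_lt (by omega) h
      omega
    have hle3 : x ≤ z := by
      by_contra h; push Not at h
      have : z % x = z := Int.emod_eq_of_lt (by omega) h
      omega
    omega
  · rintro ⟨rfl, rfl⟩
    simp

-- innermost loop: sum over z
theorem pv_sumZ (x y c : Int) (hx : 1 ≤ x) (hy : 1 ≤ y) :
    ((PySem.List.pyRange 1 (c + 1) 1).map (fun z => pvInd x y z)).sum
      = if y = x ∧ x ≤ c then 1 else 0 := by
  by_cases hxy : x = y
  · rw [List.map_congr_left (g := fun z => if z = x then (1 : Int) else 0)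
      (fun z hz => by
        have hz1 : 1 ≤ z := (PySem.List.mem_pyRange_one.mp hz).1
        unfold pvInd
        rw [if_congr (pv_cond_iff x y z hx hy hz1) rfl rfl]
        have : (x = y ∧ y = z) ↔ (z = x) := by constructor <;> intro h <;> omega
        rw [if_congr this rfl rfl])]
    rw [pv_sum_ind]
    split_ifs <;> omega
  · rw [List.map_congr_left (g := fun _ => (0 : Int))
      (fun z hz => by
        have hz1 : 1 ≤ z := (PySem.List.mem_pyRange_one.mp hz).1
        unfold pvInd
        rw [if_congr (pv_cond_iff x y z hx hy hz1) rfl rfl]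
        have : (x = y ∧ y = z) ↔ False := by constructor <;> intro h <;> simp_all
        rw [if_congr this rfl rfl, if_neg (by exact fun h => h)])]
    rw [PySem.List.sum_map_const_int]
    have : ¬ (y = x ∧ x ≤ c) := fun h => hxy h.1.symm
    simp [this]

-- middle loop: sum over y
theorem pv_sumY (x b c : Int) (hx : 1 ≤ x) :
    ((PySem.List.pyRange 1 (b + 1) 1).map (fun y => if y = x ∧ x ≤ c then (1 : Int) else 0)).sum
      = if x ≤ b ∧ x ≤ c then 1 else 0 := by
  by_cases hc : x ≤ c
  · rw [List.map_congr_left (g := fun y => if y = x then (1 : Int) else 0)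
      (fun y _ => by
        have : (y = x ∧ x ≤ c) ↔ (y = x) := by simp [hc]
        rw [if_congr this rfl rfl])]
    rw [pv_sum_ind]
    split_ifs <;> omega
  · rw [List.map_congr_left (g := fun _ => (0 : Int))
      (fun y _ => by
        have : (y = x ∧ x ≤ c) ↔ False := by simp [hc]
        rw [if_congr this rfl rfl, if_neg (fun h => h)])]
    rw [PySem.List.sum_map_const_int]
    simp [hc]

-- outer loop: sum over x, as a closed form
theorem pv_aux (b c : Int) : ∀ n : Nat,
    ((List.range n).map (fun (k : Nat) => if (1 + (k : Int)) ≤ b ∧ (1 + (k : Int)) ≤ c then (1 : Int) else 0)).sum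
      = max 0 (min (min (n : Int) b) c) := by
  intro n
  induction n with
  | zero => simp [min_def, max_def]; split_ifs <;> omega
  | succ n ih =>
    rw [List.range_succ, List.map_append, List.sum_append, ih]
    push_cast
    simp only [List.map_cons, List.map_nil, List.sum_cons, List.sum_nil, add_zero]
    simp only [min_def, max_def]
    split_ifs <;> omega

theorem pv_sumX (a b c : Int) :
    ((PySem.List.pyRange 1 (a + 1) 1).map (fun x => if x ≤ b ∧ x ≤ c then (1 : Int) else 0)).sum
      = max 0 (min (min a b) c) := by
  rw [PySem.List.pyRange_one, List.map_map]
  have h1 : (a + 1 - 1 : Int) = a := by ring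
  rw [h1]
  have h2 := pv_aux b c a.toNat
  have h3 : ((fun x => if x ≤ b ∧ x ≤ c then (1 : Int) else 0) ∘ fun k : Nat => (1 : Int) + k)
      = fun k : Nat => if (1 + (k : Int)) ≤ b ∧ (1 + (k : Int)) ≤ c then (1 : Int) else 0 := rfl
  rw [h3, h2]
  simp only [min_def, max_def]
  split_ifs <;> omega

theorem pv_main (a b c : Int) : f a b c = f_alt a b c := by
  unfold f
  have h1 : ∀ (x y : Int) (s : Int),
      (PySem.List.pyRange 1 (c + 1) 1).foldl (fun s z =>
        if (PySem.Int.mod x y == PySem.Int.mod y z) &&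
           (PySem.Int.mod x y == PySem.Int.mod z x) &&
           (PySem.Int.mod y z == PySem.Int.mod z x)
        then s + 1 else s) s
        = s + ((PySem.List.pyRange 1 (c + 1) 1).map (fun z => pvInd x y z)).sum := by
    intro x y s
    rw [PySem.List.foldl_congr_mem _ _ (fun s z => s + pvInd x y z) _
      (fun acc z _ => by
        unfold pvInd
        cases h : ((PySem.Int.mod x y == PySem.Int.mod y z) &&
           (PySem.Int.mod x y == PySem.Int.mod z x) &&
           (PySem.Int.mod y z == PySem.Int.mod z x)) <;> simp [h])]
    exact PySem.List.foldl_add _ _ _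
  have h2 : ∀ (x : Int) (s : Int),
      (PySem.List.pyRange 1 (b + 1) 1).foldl (fun s y =>
        (PySem.List.pyRange 1 (c + 1) 1).foldl (fun s z =>
          if (PySem.Int.mod x y == PySem.Int.mod y z) &&
             (PySem.Int.mod x y == PySem.Int.mod z x) &&
             (PySem.Int.mod y z == PySem.Int.mod z x)
          then s + 1 else s) s) s
        = s + ((PySem.List.pyRange 1 (b + 1) 1).map
            (fun y => ((PySem.List.pyRange 1 (c + 1) 1).map (fun z => pvInd x y z)).sum)).sum := by
    intro x s
    rw [PySem.List.foldl_congr_mem _ _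
      (fun s y => s + ((PySem.List.pyRange 1 (c + 1) 1).map (fun z => pvInd x y z)).sum) _
      (fun acc y _ => h1 x y acc)]
    exact PySem.List.foldl_add _ _ _
  rw [PySem.List.foldl_congr_mem _ _
    (fun s x => s + ((PySem.List.pyRange 1 (b + 1) 1).map
        (fun y => ((PySem.List.pyRange 1 (c + 1) 1).map (fun z => pvInd x y z)).sum)).sum) _
    (fun acc x _ => h2 x acc),
    PySem.List.foldl_add, zero_add]
  -- now rewrite the nested sums with the pointwise lemmas
  rw [List.map_congr_left (g := fun x => if x ≤ b ∧ x ≤ c then (1 : Int) else 0)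
    (fun x hx => by
      have hx1 : 1 ≤ x := (PySem.List.mem_pyRange_one.mp hx).1
      rw [List.map_congr_left (g := fun y => if y = x ∧ x ≤ c then (1 : Int) else 0)
        (fun y hy => by
          have hy1 : 1 ≤ y := (PySem.List.mem_pyRange_one.mp hy).1
          exact pv_sumZ x y c hx1 hy1)]
      exact pv_sumY x b c hx1)]
  rw [pv_sumX]
  unfold f_alt
  simp only [min_def, max_def]
  split_ifs <;> omega

-- ===== VERDICT (by name: the statement is the Claim_ definition above) =====
theorem f_spec : Claim_equal_f := by
  intro a b c _
  unfold Spec_f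
  exact pv_main a b c
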